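-- pv_equiv track=rewrite | github.com/aniketg66/Dense-Captioning-Backend-Vercel | segregate_image.py | find_valleys
-- ===== SOURCE A (Python) =====
-- def find_valleys(profile, min_gap_size):
--     # Find continuous low-value regions (valleys) in the projection profile
--     valleys = []
--     in_valley = False
--     start = 0
--     for i, val in enumerate(profile):
--         if val == 0 and not in_valley:
--             in_valley = True
--             start = i
--         elif val != 0 and in_valley:
--             if i - start >= min_gap_size:
--                 valleys.append((start, i))
--             in_valley = False
--     # Handle case where valley goes to the end
--     if in_valley and len(profile) - start >= min_gap_size:
--         valleys.append((start, len(profile)))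
--     return valleys
-- ===== SOURCE B (Python) =====
-- def find_valleys(profile, min_gap_size):
--     # Boundary-detection decomposition: detect run starts/ends by comparing each
--     # zero element with its neighbours, then pair them up; no scan state at all.
--     n = len(profile)
--     starts = [i for i in range(n)
--               if profile[i] == 0 and (i == 0 or profile[i - 1] != 0)]
--     ends = [i + 1 for i in range(n)
--             if profile[i] == 0 and (i == n - 1 or profile[i + 1] != 0)]
--     return [(s, e) for s, e in zip(starts, ends) if e - s >= min_gap_size]
-- ===== Notes on version B (the rewrite author's own statement) =====
-- stated objective: alternative
-- what changed: Replaced A's stateful flagged scan (in_valley/start plus a tail block) by stateless boundary detection: two comprehensions find run starts and run ends by comparing each zero with its neighbours, and zip pairs them up.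
import Mathlib
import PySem

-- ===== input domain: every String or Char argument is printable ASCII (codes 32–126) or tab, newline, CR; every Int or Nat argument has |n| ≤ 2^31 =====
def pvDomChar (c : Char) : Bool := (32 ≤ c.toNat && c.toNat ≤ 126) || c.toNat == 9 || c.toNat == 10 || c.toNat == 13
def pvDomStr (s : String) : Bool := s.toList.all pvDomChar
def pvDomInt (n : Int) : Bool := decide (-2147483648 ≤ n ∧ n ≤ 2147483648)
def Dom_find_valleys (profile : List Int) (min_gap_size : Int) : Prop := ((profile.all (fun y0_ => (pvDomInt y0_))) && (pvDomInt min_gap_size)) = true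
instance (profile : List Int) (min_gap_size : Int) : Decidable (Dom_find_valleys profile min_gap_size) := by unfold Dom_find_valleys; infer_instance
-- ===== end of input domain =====

-- B replaces A's stateful flagged scan by stateless boundary detection: run starts
-- and run ends are found by neighbour comparison and zipped; same cost, no state.

-- ===== PORT A =====
-- enumerate(profile) with Python int indices
def pvEnum : Int → List Int → List (Int × Int)
  | _, [] => []
  | i, x :: xs => (i, x) :: pvEnum (i + 1) xs

-- one iteration of A's for-loop: state = (valleys, in_valley, start)
def pvStepA (min_gap_size : Int) (st : List (Int × Int) × Bool × Int) (p : Int × Int) :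
    List (Int × Int) × Bool × Int :=
  let valleys := st.1; let in_valley := st.2.1; let start := st.2.2
  let i := p.1; let val := p.2
  if val == 0 && !in_valley then (valleys, true, i)
  else if val != 0 && in_valley then
    ((if i - start ≥ min_gap_size then valleys ++ [(start, i)] else valleys), false, start)
  else st

def find_valleys (profile : List Int) (min_gap_size : Int) : List (Int × Int) :=
  let st := (pvEnum 0 profile).foldl (pvStepA min_gap_size) ([], false, 0)
  let valleys := st.1; let in_valley := st.2.1; let start := st.2.2
  if in_valley && (profile.length : Int) - start ≥ min_gap_size then
    valleys ++ [(start, (profile.length : Int))]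
  else valleys

-- ===== PORT B =====
-- Source B: starts/ends by neighbour comparison over range(n), then zip + length filter
def find_valleys_alt (profile : List Int) (min_gap_size : Int) : List (Int × Int) :=
  let n := profile.length
  let starts : List Nat := (List.range n).filter
    (fun i => profile.getD i 0 == 0 && (decide (i = 0) || profile.getD (i - 1) 0 != 0))
  let ends : List Nat := ((List.range n).filter
    (fun i => profile.getD i 0 == 0 && (decide (i = n - 1) || profile.getD (i + 1) 0 != 0))).map
    (fun i => i + 1)
  ((starts.zip ends).filter (fun p => min_gap_size ≤ (p.2 : Int) - (p.1 : Int))).map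
    (fun p => ((p.1 : Int), (p.2 : Int)))

-- ===== PRECONDITION & SPEC =====
def Spec_find_valleys (profile : List Int) (min_gap_size : Int) (out : List (Int × Int)) : Prop := out = find_valleys_alt profile min_gap_size
instance (profile : List Int) (min_gap_size : Int) (out : List (Int × Int)) : Decidable (Spec_find_valleys profile min_gap_size out) := by unfold Spec_find_valleys; infer_instance

-- ===== CLAIM (what is proved, stated in full; the proofs are below) =====
def Claim_equal_find_valleys : Prop := ∀ (profile : List Int) (min_gap_size : Int), Dom_find_valleys profile min_gap_size → Spec_find_valleys profile min_gap_size (find_valleys profile min_gap_size)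

-- ===== LEMMAS AND PROOFS =====

-- accumulator-free recursive reading of A's loop (proof helper)
def pvARec (min_gap_size : Int) : List Int → Int → Bool → Int → List (Int × Int)
  | [], i, inv, s => if inv && i - s ≥ min_gap_size then [(s, i)] else []
  | v :: rest, i, inv, s =>
    if v == 0 && !inv then pvARec min_gap_size rest (i + 1) true i
    else if v != 0 && inv then
      (if i - s ≥ min_gap_size then [(s, i)] else []) ++ pvARec min_gap_size rest (i + 1) false s
    else pvARec min_gap_size rest (i + 1) inv s

-- the tail-of-loop fixup of A, as a function of the final state
def pvFin (min_gap_size n : Int) (st : List (Int × Int) × Bool × Int) : List (Int × Int) :=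
  if st.2.1 && n - st.2.2 ≥ min_gap_size then st.1 ++ [(st.2.2, n)] else st.1

-- canonical run-splitting middle form, bridging A's scan and B's boundary lists
def pvRuns (min_gap_size : Int) : List Int → Int → List (Int × Int)
  | [], _ => []
  | v :: rest, pos =>
    let k := v == 0
    let run := rest.takeWhile (fun x => (x == 0) == k)
    let endp : Int := pos + 1 + run.length
    let rest' := rest.dropWhile (fun x => (x == 0) == k)
    (if k && endp - pos ≥ min_gap_size then [(pos, endp)] else []) ++
      pvRuns min_gap_size rest' endp
termination_by xs _ => xs.length
decreasing_by
  simpa using Nat.lt_succ_of_le (List.length_dropWhile_le _ _)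

-- recursive characterizations of B's starts/ends lists
def pvStarts (allow : Bool) : List Int → Nat → List Nat
  | [], _ => []
  | v :: rest, pos => (if v == 0 && allow then [pos] else []) ++ pvStarts (v != 0) rest (pos + 1)

def pvEnds : List Int → Nat → List Nat
  | [], _ => []
  | [v], pos => if v == 0 then [pos + 1] else []
  | v :: w :: t, pos => (if v == 0 && w != 0 then [pos + 1] else []) ++ pvEnds (w :: t) (pos + 1)

def pvZipF (mgs : Int) (S E : List Nat) : List (Int × Int) :=
  ((S.zip E).filter (fun p => mgs ≤ (p.2 : Int) - (p.1 : Int))).map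
    (fun p => ((p.1 : Int), (p.2 : Int)))

lemma pvBridge (mgs : Int) : ∀ (xs : List Int) (i : Int) (inv : Bool) (s : Int) (acc : List (Int × Int)),
    pvFin mgs (i + xs.length) ((pvEnum i xs).foldl (pvStepA mgs) (acc, inv, s))
      = acc ++ pvARec mgs xs i inv s := by
  intro xs
  induction xs with
  | nil =>
    intro i inv s acc
    simp only [pvEnum, List.foldl_nil, pvFin, pvARec, List.length_nil, Nat.cast_zero, add_zero]
    cases inv <;> simp <;> split <;> simp
  | cons v rest ih =>
    intro i inv s acc
    have hn : i + ((v :: rest).length : Int) = (i + 1) + (rest.length : Int) := by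
      simp [List.length_cons]; ring
    rw [hn]
    simp only [pvEnum, List.foldl_cons]
    by_cases hv : v == 0
    · cases inv with
      | false =>
        have e1 : pvStepA mgs (acc, false, s) (i, v) = (acc, true, i) := by
          simp [pvStepA, hv]
        rw [e1, ih]
        simp [pvARec, hv]
      | true =>
        have h2 : (v != 0) = false := by simp [bne] at hv ⊢; simp [hv]
        have e1 : pvStepA mgs (acc, true, s) (i, v) = (acc, true, s) := by
          simp [pvStepA, hv, h2]
        rw [e1, ih]
        simp [pvARec, hv, h2]
    · have hv' : (v == 0) = false := by simpa using hv
      have h2 : (v != 0) = true := by simp [bne, hv']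
      cases inv with
      | false =>
        have e1 : pvStepA mgs (acc, false, s) (i, v) = (acc, false, s) := by
          simp [pvStepA, hv', h2]
        rw [e1, ih]
        simp [pvARec, hv', h2]
      | true =>
        have e1 : pvStepA mgs (acc, true, s) (i, v) =
            ((if i - s ≥ mgs then acc ++ [(s, i)] else acc), false, s) := by
          simp [pvStepA, hv', h2]
        rw [e1, ih]
        simp only [pvARec, hv', h2, Bool.not_true, Bool.and_false, Bool.and_true]
        simp only [Bool.false_eq_true, if_false, if_true]
        split <;> simp [List.append_assoc]

-- skipping a nonzero element is a no-op run step for the middle form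
lemma pvRuns_nonzero (mgs v : Int) (rest : List Int) (pos : Int) (hv : (v == 0) = false) :
    pvRuns mgs (v :: rest) pos = pvRuns mgs rest (pos + 1) := by
  cases rest with
  | nil => simp [pvRuns, hv]
  | cons w t =>
    by_cases hw : w == 0
    · simp [pvRuns, hv, hw]
    · have hw' : (w == 0) = false := by simpa using hw
      rw [pvRuns, pvRuns]
      simp only [hv, hw']
      have h1 : List.takeWhile (fun x : Int => (x == 0) == false) (w :: t)
          = w :: List.takeWhile (fun x : Int => (x == 0) == false) t :=
        List.takeWhile_cons_of_pos (by simp [hw'])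
      have h2 : List.dropWhile (fun x : Int => (x == 0) == false) (w :: t)
          = List.dropWhile (fun x : Int => (x == 0) == false) t :=
        List.dropWhile_cons_of_pos (by simp [hw'])
      rw [h1, h2]
      simp only [List.length_cons, Bool.false_and, Bool.false_eq_true, if_false, List.nil_append]
      congr 1
      push_cast
      ring

-- A's recursion agrees with the run-splitting middle form
lemma pvMainA (mgs : Int) : ∀ (xs : List Int),
    (∀ i s : Int, pvARec mgs xs i false s = pvRuns mgs xs i) ∧
    (∀ j s : Int, pvARec mgs xs j true s =
      (if (j + ((xs.takeWhile (fun x => x == 0)).length : Int)) - s ≥ mgs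
        then [(s, j + ((xs.takeWhile (fun x => x == 0)).length : Int))] else [])
      ++ pvRuns mgs (xs.dropWhile (fun x => x == 0))
          (j + ((xs.takeWhile (fun x => x == 0)).length : Int))) := by
  intro xs
  induction xs with
  | nil =>
    constructor
    · intro i s; simp [pvARec, pvRuns]
    · intro j s; simp [pvARec, pvRuns]
  | cons v rest ih =>
    obtain ⟨ihf, iht⟩ := ih
    by_cases hv : v == 0
    · constructor
      · intro i s
        rw [pvARec]
        simp only [hv, Bool.not_false, Bool.and_true, if_true]
        rw [iht (i + 1) i, pvRuns]
        simp only [hv, Bool.true_and]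
        have hpred : (fun x : Int => (x == 0) == true) = (fun x : Int => x == 0) := by
          funext x; simp
        rw [hpred]
        simp
      · intro j s
        rw [pvARec]
        have h2 : (v != 0) = false := by simp [bne] at hv ⊢; simp [hv]
        simp only [hv, h2, Bool.not_true, Bool.and_false, Bool.false_and, if_false]
        rw [iht (j + 1) s]
        have hvp : (v == 0) = true := hv
        have htw : (v :: rest).takeWhile (fun x => x == 0) = v :: rest.takeWhile (fun x => x == 0) := by
          simp [List.takeWhile_cons, hvp]
        have hdw : (v :: rest).dropWhile (fun x => x == 0) = rest.dropWhile (fun x => x == 0) := by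
          simp [List.dropWhile_cons, hvp]
        rw [htw, hdw]
        have harith : j + (((v :: rest.takeWhile (fun x => x == 0)).length : Nat) : Int)
            = (j + 1) + ((rest.takeWhile (fun x => x == 0)).length : Int) := by
          simp; push_cast; ring
        rw [harith]
        simp
    · have hv' : (v == 0) = false := by simpa using hv
      have h2 : (v != 0) = true := by simp [bne, hv']
      constructor
      · intro i s
        rw [pvARec]
        simp only [hv', h2, Bool.not_false, Bool.false_and, Bool.and_true, if_false, if_true]
        rw [ihf (i + 1) s, pvRuns_nonzero mgs v rest i hv']
        simp [hv', h2]
      · intro j s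
        rw [pvARec]
        simp only [hv', h2, Bool.not_true, Bool.false_and, Bool.and_true, if_false, if_true]
        rw [ihf (j + 1) s]
        have htw : (v :: rest).takeWhile (fun x => x == 0) = [] := by
          simp [List.takeWhile_cons, hv']
        have hdw : (v :: rest).dropWhile (fun x => x == 0) = v :: rest := by
          simp [List.dropWhile_cons, hv']
        rw [htw, hdw, pvRuns_nonzero mgs v rest _ hv']
        simp

-- ---- B side: range-filter forms equal the recursive forms ----

lemma pvStarts_range : ∀ (l : List Int) (b : Bool) (pos : Nat),
    (((List.range l.length).filter
        (fun i => l.getD i 0 == 0 && ((b && decide (i = 0)) || l.getD (i - 1) 0 != 0))).map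
      (fun i => i + pos)) = pvStarts b l pos := by
  intro l
  induction l with
  | nil => intro b pos; simp [pvStarts]
  | cons x xs ih =>
    intro b pos
    rw [List.length_cons, List.range_succ_eq_map, List.filter_cons]
    have hshift : (fun i => (x :: xs).getD i 0 == 0 &&
          ((b && decide (i = 0)) || (x :: xs).getD (i - 1) 0 != 0)) ∘ Nat.succ
        = (fun i => xs.getD i 0 == 0 &&
          (((x != 0) && decide (i = 0)) || xs.getD (i - 1) 0 != 0)) := by
      funext i
      cases i with
      | zero =>
        simp only [Function.comp_apply, List.getD_cons_succ, List.getD_cons_zero]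
        by_cases hx0 : xs.getD 0 0 = 0
        · simp only [List.getD] at hx0
          simp [hx0, bne]
        · simp only [List.getD] at hx0
          have hf : (xs[0]?.getD 0 == 0) = false := beq_eq_false_iff_ne.mpr hx0
          simp [hf]
      | succ j =>
        simp [Function.comp_apply, List.getD_cons_succ, Nat.succ_sub_one]
    rw [List.filter_map, hshift]
    have hmm : ((List.filter
          (fun i => xs.getD i 0 == 0 &&
            (((x != 0) && decide (i = 0)) || xs.getD (i - 1) 0 != 0)) (List.range xs.length)).map
          Nat.succ).map (fun i => i + pos)
        = (List.filter
          (fun i => xs.getD i 0 == 0 &&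
            (((x != 0) && decide (i = 0)) || xs.getD (i - 1) 0 != 0)) (List.range xs.length)).map
          (fun i => i + (pos + 1)) := by
      rw [List.map_map]; apply List.map_congr_left; intro a _; simp [Nat.succ_eq_add_one]; omega
    have hhead : ((x :: xs).getD 0 0 == 0 &&
        ((b && decide ((0:Nat) = 0)) || (x :: xs).getD (0 - 1) 0 != 0)) = (x == 0 && b) := by
      by_cases hx : x = 0
      · simp [hx, bne]
      · have hxf : (x == 0) = false := by simpa using hx
        simp only [List.getD_cons_zero, hxf, Bool.false_and]
    split
    · next h =>
      rw [List.map_cons, hmm, ih (x != 0) (pos + 1), pvStarts]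
      rw [hhead] at h
      rw [if_pos h]
      simp
    · next h =>
      rw [hmm, ih (x != 0) (pos + 1), pvStarts]
      rw [hhead] at h
      rw [if_neg h]
      simp

lemma pvEnds_range : ∀ (l : List Int) (pos : Nat),
    (((List.range l.length).filter
        (fun i => l.getD i 0 == 0 && (decide (i = l.length - 1) || l.getD (i + 1) 0 != 0))).map
      (fun i => i + 1 + pos)) = pvEnds l pos := by
  intro l
  induction l with
  | nil => intro pos; simp [pvEnds]
  | cons x xs ih =>
    intro pos
    cases xs with
    | nil =>
      by_cases hx : x = 0
      · simp [pvEnds, hx, List.range_succ]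
        omega
      · simp [pvEnds, hx, List.range_succ]
    | cons w t =>
      have hlen : (x :: w :: t).length = (w :: t).length + 1 := rfl
      rw [hlen, List.range_succ_eq_map, List.filter_cons]
      have hshift : (fun i => (x :: w :: t).getD i 0 == 0 &&
            (decide (i = (w :: t).length + 1 - 1) || (x :: w :: t).getD (i + 1) 0 != 0)) ∘ Nat.succ
          = (fun i => (w :: t).getD i 0 == 0 &&
            (decide (i = (w :: t).length - 1) || (w :: t).getD (i + 1) 0 != 0)) := by
        funext i
        have hd : decide (i + 1 = (w :: t).length + 1 - 1) = decide (i = (w :: t).length - 1) := by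
          simp [List.length_cons]
        simp only [Function.comp_apply, Nat.succ_eq_add_one, List.getD_cons_succ]
        rw [hd]
      rw [List.filter_map, hshift]
      have hmm : ((List.filter
            (fun i => (w :: t).getD i 0 == 0 &&
              (decide (i = (w :: t).length - 1) || (w :: t).getD (i + 1) 0 != 0))
            (List.range (w :: t).length)).map Nat.succ).map (fun i => i + 1 + pos)
          = (List.filter
            (fun i => (w :: t).getD i 0 == 0 &&
              (decide (i = (w :: t).length - 1) || (w :: t).getD (i + 1) 0 != 0))
            (List.range (w :: t).length)).map (fun i => i + 1 + (pos + 1)) := by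
        rw [List.map_map]; apply List.map_congr_left; intro a _; simp [Nat.succ_eq_add_one]; omega
      have hhead : ((x :: w :: t).getD 0 0 == 0 &&
          (decide ((0:Nat) = (w :: t).length + 1 - 1) || (x :: w :: t).getD (0 + 1) 0 != 0))
          = (x == 0 && w != 0) := by
        have h0 : decide ((0:Nat) = (w :: t).length + 1 - 1) = false := by
          simp [List.length_cons]
        simp [h0]
      split
      · next h =>
        rw [List.map_cons, hmm, ih (pos + 1), pvEnds]
        rw [hhead] at h
        rw [if_pos h]
        simp
        omega
      · next h =>
        rw [hmm, ih (pos + 1), pvEnds]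
        rw [hhead] at h
        rw [if_neg h]
        simp

-- ---- middle form equals zip of starts/ends ----

lemma pvZipF_cons (mgs : Int) (a b : Nat) (S E : List Nat) :
    pvZipF mgs (a :: S) (b :: E)
      = (if mgs ≤ (b : Int) - (a : Int) then [((a : Int), (b : Int))] else []) ++ pvZipF mgs S E := by
  simp only [pvZipF, List.zip_cons_cons, List.filter_cons]
  split <;> simp_all

lemma pvStarts_zeros : ∀ (t : List Int), (∀ x ∈ t, (x == 0) = true) →
    ∀ (d : List Int) (pos : Nat), pvStarts false (t ++ d) pos = pvStarts false d (pos + t.length) := by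
  intro t
  induction t with
  | nil => intro _ d pos; simp
  | cons v t2 ih =>
    intro h d pos
    have hv := h v (by simp)
    have hvne : (v != 0) = false := by simp [bne, hv]
    rw [List.cons_append, pvStarts, hvne, ih (fun x hx => h x (by simp [hx]))]
    have e : pos + 1 + t2.length = pos + (v :: t2).length := by
      simp [List.length_cons]; omega
    rw [e]
    simp

lemma pvStarts_nonzero (u : Int) (t' : List Int) (q : Nat) (hu : (u == 0) = false) :
    pvStarts false (u :: t') q = pvStarts true t' (q + 1) := by
  have : (u != 0) = true := by simp [bne, hu]
  rw [pvStarts, hu, this]; simp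

lemma pvEnds_nonzero (u : Int) (t' : List Int) (q : Nat) (hu : (u == 0) = false) :
    pvEnds (u :: t') q = pvEnds t' (q + 1) := by
  cases t' with
  | nil => simp [pvEnds, hu]
  | cons w t2 => rw [pvEnds, hu]; simp

lemma pvEnds_zeros : ∀ (t : List Int) (v : Int), (v == 0) = true → (∀ x ∈ t, (x == 0) = true) →
    ∀ (d : List Int), (d = [] ∨ ∃ u t', d = u :: t' ∧ (u == 0) = false) →
    ∀ pos : Nat, pvEnds ((v :: t) ++ d) pos = (pos + (v :: t).length) :: pvEnds d (pos + (v :: t).length) := by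
  intro t
  induction t with
  | nil =>
    intro v hv _ d hd pos
    rcases hd with rfl | ⟨u, t', rfl, hu⟩
    · simp [pvEnds, hv]
    · rw [List.cons_append, List.nil_append, pvEnds, hv]
      have : (u != 0) = true := by simp [bne, hu]
      simp [this]
  | cons w t2 ih =>
    intro v hv hall d hd pos
    have hw := hall w (by simp)
    have hwne : (w != 0) = false := by simp [bne, hw]
    rw [show (v :: w :: t2) ++ d = v :: w :: (t2 ++ d) from by simp]
    rw [pvEnds, hwne]
    have hrec := ih w hw (fun x hx => hall x (by simp [hx])) d hd (pos + 1)
    rw [show (w :: (t2 ++ d)) = (w :: t2) ++ d from by simp, hrec]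
    have e : pos + 1 + (w :: t2).length = pos + (v :: w :: t2).length := by
      simp [List.length_cons]; omega
    rw [e]
    simp

-- every element of takeWhile (== 0) is zero
lemma pvTakeWhile_zero (rest : List Int) :
    ∀ x ∈ rest.takeWhile (fun x : Int => x == 0), (x == 0) = true := by
  intro x hx
  exact List.mem_takeWhile_imp (p := fun y : Int => y == 0) hx

-- head of dropWhile is nonzero (or the drop is empty)
lemma pvDropWhile_shape (rest : List Int) :
    rest.dropWhile (fun x : Int => x == 0) = [] ∨
    ∃ u t', rest.dropWhile (fun x : Int => x == 0) = u :: t' ∧ (u == 0) = false := by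
  cases hd : rest.dropWhile (fun x : Int => x == 0) with
  | nil => exact Or.inl rfl
  | cons u t' =>
    right
    refine ⟨u, t', rfl, ?_⟩
    have := List.head?_dropWhile_not (fun x : Int => x == 0) rest
    rw [hd] at this
    simpa using this

-- the middle form equals B's zipped boundary lists
lemma pvMainB (mgs : Int) : ∀ (n : Nat) (xs : List Int), xs.length ≤ n → ∀ pos : Nat,
    pvZipF mgs (pvStarts true xs pos) (pvEnds xs pos) = pvRuns mgs xs (pos : Int) := by
  intro n
  induction n with
  | zero =>
    intro xs h pos
    have : xs = [] := List.eq_nil_of_length_eq_zero (Nat.le_zero.mp h)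
    subst this
    simp [pvStarts, pvEnds, pvZipF, pvRuns]
  | succ n ih =>
    intro xs h pos
    cases xs with
    | nil => simp [pvStarts, pvEnds, pvZipF, pvRuns]
    | cons v rest =>
      by_cases hv : (v == 0) = true
      · -- zero run starting at pos
        have hrest : rest.takeWhile (fun x : Int => x == 0) ++ rest.dropWhile (fun x : Int => x == 0) = rest :=
          List.takeWhile_append_dropWhile
        have hallt := pvTakeWhile_zero rest
        have hdshape := pvDropWhile_shape rest
        have hvne : (v != 0) = false := by simp [bne, hv]
        have hS : pvStarts true (v :: rest) pos
            = pos :: pvStarts false (rest.dropWhile (fun x : Int => x == 0))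
                (pos + 1 + (rest.takeWhile (fun x : Int => x == 0)).length) := by
          rw [pvStarts, hv, hvne, ← hrest,
            pvStarts_zeros (rest.takeWhile (fun x : Int => x == 0)) hallt _ (pos + 1)]
          simp
        have hE : pvEnds (v :: rest) pos
            = (pos + 1 + (rest.takeWhile (fun x : Int => x == 0)).length)
              :: pvEnds (rest.dropWhile (fun x : Int => x == 0))
                (pos + 1 + (rest.takeWhile (fun x : Int => x == 0)).length) := by
          rw [show v :: rest = (v :: rest.takeWhile (fun x : Int => x == 0))
                ++ rest.dropWhile (fun x : Int => x == 0) from by rw [List.cons_append, hrest]]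
          rw [pvEnds_zeros (rest.takeWhile (fun x : Int => x == 0)) v hv hallt _ hdshape pos]
          have e : pos + (v :: rest.takeWhile (fun x : Int => x == 0)).length
              = pos + 1 + (rest.takeWhile (fun x : Int => x == 0)).length := by
            simp [List.length_cons]; omega
          rw [e]
        have hR : pvRuns mgs (v :: rest) (pos : Int)
            = (if mgs ≤ ((pos : Int) + 1 + ((rest.takeWhile (fun x : Int => x == 0)).length : Int)) - (pos : Int)
                then [((pos : Int), (pos : Int) + 1 + ((rest.takeWhile (fun x : Int => x == 0)).length : Int))] else [])
              ++ pvRuns mgs (rest.dropWhile (fun x : Int => x == 0))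
                ((pos : Int) + 1 + ((rest.takeWhile (fun x : Int => x == 0)).length : Int)) := by
          rw [pvRuns]
          simp only [hv, Bool.true_and, ge_iff_le]
          rw [show (fun x : Int => (x == 0) == true) = (fun x : Int => x == 0) from by
            funext x; simp]
          simp only [decide_eq_true_eq]
        have hcast : (((pos + 1 + (rest.takeWhile (fun x : Int => x == 0)).length : Nat)) : Int)
            = (pos : Int) + 1 + (((rest.takeWhile (fun x : Int => x == 0)).length : Nat) : Int) := by
          push_cast; ring
        rw [hS, hE, pvZipF_cons, hcast, hR]
        congr 1
        rcases hdshape with hdeq | ⟨u, t', hdeq, hu⟩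
        · rw [hdeq]
          simp [pvStarts, pvEnds, pvZipF, pvRuns]
        · rw [hdeq, pvStarts_nonzero u t' _ hu, pvEnds_nonzero u t' _ hu]
          have hlen : t'.length ≤ n := by
            have h1 : rest.length ≤ n := by simpa using h
            have h2 : (rest.dropWhile (fun x : Int => x == 0)).length ≤ rest.length :=
              List.length_dropWhile_le _ _
            rw [hdeq] at h2
            simp only [List.length_cons] at h2
            omega
          rw [ih t' hlen (pos + 1 + (rest.takeWhile (fun x : Int => x == 0)).length + 1)]
          rw [show pvRuns mgs (u :: t')
                ((pos : Int) + 1 + ((rest.takeWhile (fun x : Int => x == 0)).length : Int))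
              = pvRuns mgs t'
                ((pos : Int) + 1 + ((rest.takeWhile (fun x : Int => x == 0)).length : Int) + 1)
            from pvRuns_nonzero mgs u t' _ hu]
          rw [show (((pos + 1 + (rest.takeWhile (fun x : Int => x == 0)).length + 1 : Nat)) : Int)
              = (pos : Int) + 1 + ((rest.takeWhile (fun x : Int => x == 0)).length : Int) + 1 from by
            push_cast; ring]
      · -- nonzero head: skip
        have hv' : (v == 0) = false := by simpa using hv
        have hvne : (v != 0) = true := by simp [bne, hv']
        rw [pvStarts, hv', hvne]
        simp only [Bool.false_and, if_neg (by simp : ¬ (false = true)), List.nil_append]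
        rw [pvEnds_nonzero v rest pos hv']
        have hlen : rest.length ≤ n := by simpa using h
        rw [ih rest hlen (pos + 1), pvRuns_nonzero mgs v rest (pos : Int) hv']
        rw [show (((pos + 1 : Nat)) : Int) = (pos : Int) + 1 from by push_cast; ring]

-- ===== VERDICT (by name: the statement is the Claim_ definition above) =====
theorem find_valleys_spec : Claim_equal_find_valleys := by
  intro profile min_gap_size _
  unfold Spec_find_valleys
  have hA : find_valleys profile min_gap_size = pvRuns min_gap_size profile 0 := by
    unfold find_valleys
    have hb := pvBridge min_gap_size profile 0 false 0 []
    simp only [zero_add, List.nil_append] at hb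
    calc pvFin min_gap_size (profile.length : Int)
          ((pvEnum 0 profile).foldl (pvStepA min_gap_size) ([], false, 0))
        = pvARec min_gap_size profile 0 false 0 := hb
      _ = pvRuns min_gap_size profile 0 := (pvMainA min_gap_size profile).1 0 0
  have hS1 := pvStarts_range profile true 0
  simp only [Bool.true_and, Nat.add_zero, List.map_id'] at hS1
  have hE1 := pvEnds_range profile 0
  simp only [Nat.add_zero] at hE1
  have hB : find_valleys_alt profile min_gap_size
      = pvZipF min_gap_size (pvStarts true profile 0) (pvEnds profile 0) := by
    simp only [find_valleys_alt, pvZipF]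
    rw [hS1, hE1]
  have hM := pvMainB min_gap_size profile.length profile (le_refl _) 0
  rw [hA, hB, hM]
  norm_num
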